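-- pv_equiv track=rewrite | github.com/mrkmg/necroid | necroid/core/mod.py | parse_patch_filename
-- ===== SOURCE A (Python) =====
-- from typing import Literal
--
-- Kind = Literal["patch", "new", "delete"]
--
-- INSTALL_DESTINATIONS: tuple[str, str] = ("client", "server")
--
-- _KIND_SUFFIXES: tuple[tuple[str, Kind], ...] = (
--     (".java.patch", "patch"),
--     (".java.new", "new"),
--     (".java.delete", "delete"),
-- )
--
-- def parse_patch_filename(rel_full: str) -> tuple[str, Kind, frozenset[str]] | None:
--     """Parse a path under patches/. Returns (rel, kind, applies_to) or None
--     if the filename isn't a patch file.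
--
--     applies_to:
--       - frozenset({"client", "server"}) for shared (no postfix)
--       - frozenset({"client"}) for *.client postfix
--       - frozenset({"server"}) for *.server postfix
--     """
--     base = rel_full
--     postfix = ""
--     for t in INSTALL_DESTINATIONS:
--         if base.endswith("." + t):
--             postfix = t
--             base = base[: -(len(t) + 1)]
--             break
--     for suf, kind in _KIND_SUFFIXES:
--         if base.endswith(suf):
--             rel = base[: -len(suf)] + ".java"
--             applies = frozenset((postfix,)) if postfix else frozenset(INSTALL_DESTINATIONS)
--             return rel, kind, applies
--     return None
-- ===== SOURCE B (Python) =====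
-- INSTALL_DESTINATIONS: tuple[str, str] = ("client", "server")
--
-- def parse_patch_filename(rel_full: str):
--     """Component-wise variant: split the path on '.' once and inspect the
--     trailing components instead of repeated endswith/slice passes."""
--     parts = rel_full.split(".")
--     if parts[-1] in INSTALL_DESTINATIONS:
--         applies = frozenset((parts[-1],))
--         parts.pop()
--     else:
--         applies = frozenset(INSTALL_DESTINATIONS)
--     if len(parts) >= 3 and parts[-2] == "java" and parts[-1] in ("patch", "new", "delete"):
--         return ".".join(parts[:-2]) + ".java", parts[-1], applies
--     return None
-- ===== Notes on version B (the rewrite author's own statement) =====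
-- stated objective: idiomatic
-- what changed: A strips an optional '.client'/'.server' and then a '.java.<kind>' suffix with two sequential endswith/slice loops; B splits the path on '.' once and decides everything by inspecting the trailing components of the part list, rebuilding rel with join.
import Mathlib
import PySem

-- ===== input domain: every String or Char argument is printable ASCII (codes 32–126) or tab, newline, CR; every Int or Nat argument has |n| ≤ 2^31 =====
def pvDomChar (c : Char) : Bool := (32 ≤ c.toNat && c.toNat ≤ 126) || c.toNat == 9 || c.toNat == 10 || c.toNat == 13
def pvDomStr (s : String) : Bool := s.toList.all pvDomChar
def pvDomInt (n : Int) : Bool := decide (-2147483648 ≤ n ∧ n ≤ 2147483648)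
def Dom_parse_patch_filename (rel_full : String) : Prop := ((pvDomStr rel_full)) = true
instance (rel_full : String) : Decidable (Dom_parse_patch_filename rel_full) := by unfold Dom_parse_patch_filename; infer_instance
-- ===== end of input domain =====

-- B re-implements A's two endswith/slice stripping passes by splitting the path on '.'
-- once and inspecting trailing components (objective: idiomatic); return values proved equal.

-- ===== PORT A =====
-- A's work is on the string's characters; ports operate on rel_full.toList (PySem.Chars level).

-- the loop 'for t in INSTALL_DESTINATIONS: if base.endswith("." + t): ... break'
def pvLoop1 : List (List Char) → List Char → (List Char × List Char)
  | [], base => ([], base)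
  | t :: ts, base =>
      if PySem.Chars.endswith base ('.' :: t) then
        (t, PySem.Chars.slice base none (some (-((t.length : Int) + 1))))
      else pvLoop1 ts base

-- the loop 'for suf, kind in _KIND_SUFFIXES: if base.endswith(suf): return ...'
def pvLoop2 : List (List Char × List Char) → List Char → List Char → Option (String × String × List String)
  | [], _, _ => none
  | (suf, kind) :: ss, base, pfix =>
      if PySem.Chars.endswith base suf then
        some (String.ofList (PySem.Chars.slice base none (some (-(suf.length : Int))) ++ ".java".toList),
              String.ofList kind,
              if pfix.isEmpty then ["client", "server"] else [String.ofList pfix])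
      else pvLoop2 ss base pfix

def parse_patch_filename (rel_full : String) : Option (String × String × List String) :=
  let r := pvLoop1 ["client".toList, "server".toList] rel_full.toList
  pvLoop2 [(".java.patch".toList, "patch".toList),
           (".java.new".toList, "new".toList),
           (".java.delete".toList, "delete".toList)] r.2 r.1

-- ===== PORT B =====
-- Source B: parts = rel_full.split("."); pop an install destination off the end;
-- then check parts[-2] == "java" and parts[-1] is a kind.  parts[-1] is ported as
-- getLastD [] (split never returns an empty list), parts.pop()/parts[:-2] as dropLast
-- (exact under the 'len(parts) >= 3' guard), parts[-2] as dropLast.getLastD [].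
def parse_patch_filename_alt (rel_full : String) : Option (String × String × List String) :=
  let parts := PySem.Chars.splitOn rel_full.toList ['.']
  let last1 := parts.getLastD []
  let ap :=
    if last1 = "client".toList ∨ last1 = "server".toList
    then ([String.ofList last1], parts.dropLast)
    else ((["client", "server"] : List String), parts)
  if 3 ≤ ap.2.length ∧ ap.2.dropLast.getLastD [] = "java".toList ∧
     (ap.2.getLastD [] = "patch".toList ∨ ap.2.getLastD [] = "new".toList ∨
      ap.2.getLastD [] = "delete".toList)
  then some (String.ofList (PySem.Chars.join ['.'] (ap.2.dropLast.dropLast) ++ ".java".toList),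
             String.ofList (ap.2.getLastD []), ap.1)
  else none

-- ===== PRECONDITION & SPEC =====
def Spec_parse_patch_filename (rel_full : String) (out : Option (String × String × List String)) : Prop := out = parse_patch_filename_alt rel_full
instance (rel_full : String) (out : Option (String × String × List String)) : Decidable (Spec_parse_patch_filename rel_full out) := by unfold Spec_parse_patch_filename; infer_instance

-- ===== CLAIM (what is proved, stated in full; the proofs are below) =====
def Claim_equal_parse_patch_filename : Prop := ∀ (rel_full : String), Dom_parse_patch_filename rel_full → Spec_parse_patch_filename rel_full (parse_patch_filename rel_full)

-- ===== LEMMAS AND PROOFS =====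

-- A fuel-free model of PySem.Chars.splitOn on the single-character separator '.'.
def pvSplit : List Char → List (List Char)
  | [] => [[]]
  | c :: r =>
      if c = '.' then [] :: pvSplit r
      else match pvSplit r with
           | [] => [[c]]
           | p :: ps => (c :: p) :: ps

theorem pvSplit_ne_nil (l : List Char) : pvSplit l ≠ [] := by
  cases l with
  | nil => simp [pvSplit]
  | cons c r =>
      simp only [pvSplit]
      split <;> [simp; skip]
      split <;> simp

theorem pvSplit_go_eq (l : List Char) : ∀ (fuel : Nat) (cur : List Char) (acc : List (List Char)),
    l.length < fuel →
    PySem.Chars.splitOn.go ['.'] fuel l cur acc =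
      acc.reverse ++ (match pvSplit l with
                      | [] => []
                      | p :: ps => (cur.reverse ++ p) :: ps) := by
  induction l with
  | nil =>
      intro fuel cur acc h
      cases fuel with
      | zero => omega
      | succ f => simp [PySem.Chars.splitOn.go, pvSplit]
  | cons c r ih =>
      intro fuel cur acc h
      cases fuel with
      | zero => omega
      | succ f =>
        obtain ⟨p, ps, hps⟩ := List.exists_cons_of_ne_nil (pvSplit_ne_nil r)
        by_cases hc : c = '.'
        · subst hc
          rw [PySem.Chars.splitOn.go]
          have hpre : (['.'] : List Char).isPrefixOf ('.' :: r) = true := by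
            simp [List.isPrefixOf]
          rw [if_pos hpre]
          simp only [List.length, List.drop_succ_cons, List.drop_zero]
          rw [ih f [] ((cur.reverse) :: acc) (by simp at h; omega)]
          simp [pvSplit, hps]
        · rw [PySem.Chars.splitOn.go]
          have hpre : (['.'] : List Char).isPrefixOf (c :: r) = false := by
            simp [List.isPrefixOf]; exact fun hh => (hc hh.symm).elim
          rw [if_neg (by simp [hpre])]
          rw [ih f (c :: cur) acc (by simp at h; omega)]
          simp [pvSplit, hc, hps]

theorem splitOn_eq_pvSplit (l : List Char) : PySem.Chars.splitOn l ['.'] = pvSplit l := by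
  obtain ⟨p, ps, hps⟩ := List.exists_cons_of_ne_nil (pvSplit_ne_nil l)
  rw [PySem.Chars.splitOn, pvSplit_go_eq l (l.length + 1) [] [] (by omega)]
  simp [hps]

theorem pvSplit_no_dot (l : List Char) : ∀ p ∈ pvSplit l, '.' ∉ p := by
  induction l with
  | nil => intro p hp; simp [pvSplit] at hp; simp [hp]
  | cons c r ih =>
      intro p hp
      by_cases hc : c = '.'
      · subst hc; simp [pvSplit] at hp
        rcases hp with h | h
        · simp [h]
        · exact ih p h
      · obtain ⟨q, qs, hqs⟩ := List.exists_cons_of_ne_nil (pvSplit_ne_nil r)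
        simp only [pvSplit, if_neg hc, hqs] at hp
        rcases List.mem_cons.mp hp with h | h
        · subst h
          intro hmem
          rcases List.mem_cons.mp hmem with h | h
          · exact hc h.symm
          · exact ih q (by simp [hqs]) h
        · exact ih p (by simp [hqs, h])

theorem pvSplit_of_no_dot (l : List Char) (h : '.' ∉ l) : pvSplit l = [l] := by
  induction l with
  | nil => simp [pvSplit]
  | cons c r ih =>
      have hc : c ≠ '.' := by intro hh; exact h (by simp [hh])
      have hr : pvSplit r = [r] := ih (fun hh => h (by simp [hh]))
      simp [pvSplit, hc, hr]

theorem pvSplit_append_dot (p : List Char) (r : List Char) (h : '.' ∉ p) :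
    pvSplit (p ++ '.' :: r) = p :: pvSplit r := by
  induction p with
  | nil => simp [pvSplit]
  | cons a p' ih =>
      have ha : a ≠ '.' := by intro hh; exact h (by simp [hh])
      have hp' : pvSplit (p' ++ '.' :: r) = p' :: pvSplit r := ih (fun hh => h (by simp [hh]))
      simp [pvSplit, ha, hp']

theorem join_consHead (c : Char) (p : List Char) (ps : List (List Char)) :
    PySem.Chars.join ['.'] ((c :: p) :: ps) = c :: PySem.Chars.join ['.'] (p :: ps) := by
  cases ps with
  | nil => simp [PySem.Chars.join_singleton]
  | cons q qs => simp [PySem.Chars.join_cons_cons]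

theorem join_pvSplit (l : List Char) : PySem.Chars.join ['.'] (pvSplit l) = l := by
  induction l with
  | nil => simp [pvSplit, PySem.Chars.join_singleton]
  | cons c r ih =>
      obtain ⟨p, ps, hps⟩ := List.exists_cons_of_ne_nil (pvSplit_ne_nil r)
      by_cases hc : c = '.'
      · subst hc
        have hsp : pvSplit ('.' :: r) = [] :: p :: ps := by simp [pvSplit, hps]
        rw [hsp, PySem.Chars.join_cons_cons]
        rw [hps] at ih
        simp [ih]
      · simp only [pvSplit, if_neg hc, hps]
        rw [join_consHead]
        rw [hps] at ih
        simp [ih]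

theorem join_concat (Q : List (List Char)) (t : List Char) (h : Q ≠ []) :
    PySem.Chars.join ['.'] (Q ++ [t]) = PySem.Chars.join ['.'] Q ++ '.' :: t := by
  induction Q with
  | nil => exact absurd rfl h
  | cons a Q' ih =>
      cases Q' with
      | nil => simp [PySem.Chars.join_cons_cons, PySem.Chars.join_singleton]
      | cons b Q'' =>
          have h2 := ih (by simp)
          simp only [List.cons_append] at h2 ⊢
          rw [PySem.Chars.join_cons_cons, PySem.Chars.join_cons_cons, h2]
          simp [List.append_assoc]

theorem pvSplit_join (Q : List (List Char)) (hQ : Q ≠ []) (h : ∀ p ∈ Q, '.' ∉ p) :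
    pvSplit (PySem.Chars.join ['.'] Q) = Q := by
  induction Q with
  | nil => exact absurd rfl hQ
  | cons a Q' ih =>
      cases Q' with
      | nil => simp [PySem.Chars.join_singleton, pvSplit_of_no_dot a (h a (by simp))]
      | cons b Q'' =>
          rw [PySem.Chars.join_cons_cons]
          have ha : '.' ∉ a := h a (by simp)
          have heq : a ++ ['.'] ++ PySem.Chars.join ['.'] (b :: Q'') =
              a ++ '.' :: PySem.Chars.join ['.'] (b :: Q'') := by simp
          rw [heq, pvSplit_append_dot a _ ha, ih (by simp) (fun p hp => h p (by simp [hp]))]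

theorem pv_slice_neg (l : List Char) (k : Nat) (hk0 : 0 < k) (hk : k ≤ l.length) :
    PySem.Chars.slice l none (some (-(k : Int))) = l.take (l.length - k) := by
  simp only [PySem.Chars.slice_eq_listSlice, PySem.List.slice, PySem.List.clampIdx]
  rw [if_pos (by omega : -(k : Int) < 0), if_neg (by omega)]
  simp only [List.drop_zero, Nat.sub_zero]
  congr 1
  omega

-- the central suffix characterisation: for a dot-free token t,
-- l ends with "." ++ t  iff  the last split piece is t and there are ≥ 2 pieces
theorem suffix_iff_pvSplit (t : List Char) (ht : '.' ∉ t) (l : List Char) :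
    (('.' :: t) <:+ l) ↔ ∃ Q, Q ≠ [] ∧ pvSplit l = Q ++ [t] := by
  constructor
  · show ('.' :: t) <:+ l → _
    induction l with
    | nil => intro h; have := List.suffix_nil.mp h; simp at this
    | cons c r ih =>
        intro h
        rcases List.suffix_cons_iff.mp h with heq | hsuf
        · injection heq with h1 h2
          subst h1; subst h2
          refine ⟨[[]], by simp, ?_⟩
          simp [pvSplit, pvSplit_of_no_dot t ht]
        · obtain ⟨Q, hQ, hsp⟩ := ih hsuf
          by_cases hc : c = '.'
          · subst hc
            exact ⟨[] :: Q, by simp, by simp [pvSplit, hsp]⟩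
          · obtain ⟨q, Q', hq⟩ := List.exists_cons_of_ne_nil hQ
            subst hq
            refine ⟨(c :: q) :: Q', by simp, ?_⟩
            simp [pvSplit, hc, hsp]
  · rintro ⟨Q, hQ, hsp⟩
    have hl : l = PySem.Chars.join ['.'] Q ++ '.' :: t := by
      rw [← join_pvSplit l, hsp, join_concat Q t hQ]
    rw [hl]
    exact List.suffix_append _ _

-- stripping the matched suffix: under the same condition the slice A takes is join of the rest
theorem strip_eq_join (l : List Char) (Q : List (List Char)) (t : List Char)
    (hQ : Q ≠ []) (h : pvSplit l = Q ++ [t]) :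
    PySem.Chars.slice l none (some (-((t.length : Int) + 1))) = PySem.Chars.join ['.'] Q := by
  have hl : l = PySem.Chars.join ['.'] Q ++ '.' :: t := by
    rw [← join_pvSplit l, h, join_concat Q t hQ]
  have hlen : l.length = (PySem.Chars.join ['.'] Q).length + (t.length + 1) := by
    rw [hl]; simp
  have hneg : -((t.length : Int) + 1) = -(((t.length + 1 : Nat) : Int)) := by norm_cast
  rw [hneg, pv_slice_neg l (t.length + 1) (by omega) (by omega)]
  conv_lhs => rw [hl]
  exact List.take_left' (by simp)

-- two-token version for the ".java.<kind>" suffixes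
theorem suffix2_iff_pvSplit (s t : List Char) (hs : '.' ∉ s) (ht : '.' ∉ t) (l : List Char) :
    (('.' :: s ++ '.' :: t) <:+ l) ↔ ∃ Q, Q ≠ [] ∧ pvSplit l = Q ++ [s, t] := by
  constructor
  · intro h
    obtain ⟨Q1, hQ1, hsp1⟩ := (suffix_iff_pvSplit t ht l).mp
      (List.IsSuffix.trans (List.suffix_append ('.' :: s) ('.' :: t)) h)
    have hl : l = PySem.Chars.join ['.'] Q1 ++ '.' :: t := by
      rw [← join_pvSplit l, hsp1, join_concat Q1 t hQ1]
    obtain ⟨u, hu⟩ := h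
    have hcancel : u ++ '.' :: s = PySem.Chars.join ['.'] Q1 := by
      apply List.append_cancel_right (as := u ++ '.' :: s) (bs := '.' :: t)
      rw [← hl, ← hu]; simp [List.append_assoc]
    have hsufs : ('.' :: s) <:+ PySem.Chars.join ['.'] Q1 := ⟨u, hcancel⟩
    have hnd : ∀ p ∈ Q1, '.' ∉ p := fun p hp =>
      pvSplit_no_dot l p (by rw [hsp1]; exact List.mem_append_left _ hp)
    obtain ⟨Q2, hQ2, hsp2⟩ := (suffix_iff_pvSplit s hs _).mp hsufs
    rw [pvSplit_join Q1 hQ1 hnd] at hsp2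
    exact ⟨Q2, hQ2, by rw [hsp1, hsp2]; simp⟩
  · rintro ⟨Q, hQ, hsp⟩
    have hl : l = PySem.Chars.join ['.'] Q ++ ('.' :: s ++ '.' :: t) := by
      rw [← join_pvSplit l, hsp, show Q ++ [s, t] = (Q ++ [s]) ++ [t] by simp,
          join_concat _ t (by simp), join_concat Q s hQ]
      simp [List.append_assoc]
    rw [hl]
    exact List.suffix_append _ _

theorem strip2_eq_join (l : List Char) (Q : List (List Char)) (s t : List Char)
    (hQ : Q ≠ []) (h : pvSplit l = Q ++ [s, t]) :
    PySem.Chars.slice l none (some (-(((s.length : Int) + t.length) + 2))) =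
      PySem.Chars.join ['.'] Q := by
  have hl : l = PySem.Chars.join ['.'] Q ++ ('.' :: s ++ '.' :: t) := by
    rw [← join_pvSplit l, h, show Q ++ [s, t] = (Q ++ [s]) ++ [t] by simp,
        join_concat _ t (by simp), join_concat Q s hQ]
    simp [List.append_assoc]
  have hlen : l.length = (PySem.Chars.join ['.'] Q).length + (s.length + t.length + 2) := by
    rw [hl]; simp; omega
  have hneg : -(((s.length : Int) + t.length) + 2) = -(((s.length + t.length + 2 : Nat) : Int)) := by
    push_cast; ring
  rw [hneg, pv_slice_neg l (s.length + t.length + 2) (by omega) (by omega)]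
  conv_lhs => rw [hl]
  exact List.take_left' (by simp; omega)

-- evaluating A's second loop as a condition on the split pieces of base
theorem stage2 (base pfix : List Char) :
    pvLoop2 [(".java.patch".toList, "patch".toList),
             (".java.new".toList, "new".toList),
             (".java.delete".toList, "delete".toList)] base pfix =
      (if 3 ≤ (pvSplit base).length ∧ (pvSplit base).dropLast.getLastD [] = "java".toList ∧
          ((pvSplit base).getLastD [] = "patch".toList ∨ (pvSplit base).getLastD [] = "new".toList ∨
           (pvSplit base).getLastD [] = "delete".toList)
       then some (String.ofList (PySem.Chars.join ['.'] ((pvSplit base).dropLast.dropLast) ++ ".java".toList),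
                  String.ofList ((pvSplit base).getLastD []),
                  if pfix.isEmpty then ["client", "server"] else [String.ofList pfix])
       else none) := by
  have hT : ∀ (s t : List Char), '.' ∉ s → '.' ∉ t →
      (PySem.Chars.endswith base ('.' :: s ++ '.' :: t) = true ↔
        ∃ Q, Q ≠ [] ∧ pvSplit base = Q ++ [s, t]) := by
    intro s t hs ht
    rw [PySem.Chars.endswith_iff]
    exact suffix2_iff_pvSplit s t hs ht base
  have hF : ∀ (s t : List Char), '.' ∉ s → '.' ∉ t →
      (¬ ∃ Q, Q ≠ [] ∧ pvSplit base = Q ++ [s, t]) →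
      PySem.Chars.endswith base ('.' :: s ++ '.' :: t) = false := by
    intro s t hs ht hn
    rw [Bool.eq_false_iff]
    exact fun he => hn ((hT s t hs ht).mp he)
  have l1 : (".java.patch".toList) = '.' :: "java".toList ++ '.' :: "patch".toList := by decide
  have l2 : (".java.new".toList) = '.' :: "java".toList ++ '.' :: "new".toList := by decide
  have l3 : (".java.delete".toList) = '.' :: "java".toList ++ '.' :: "delete".toList := by decide
  by_cases hlen3 : 3 ≤ (pvSplit base).length
  case neg =>
    have hno : ∀ (s' t' : List Char), ¬ ∃ Q, Q ≠ [] ∧ pvSplit base = Q ++ [s', t'] := by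
      rintro s' t' ⟨Q, hQ, hsp⟩
      apply hlen3
      rw [hsp]
      have h1 : 0 < Q.length := List.length_pos_of_ne_nil hQ
      simp [List.length_append]
      omega
    simp only [pvLoop2, l1, l2, l3]
    rw [hF _ _ (by decide) (by decide) (hno _ _), hF _ _ (by decide) (by decide) (hno _ _),
        hF _ _ (by decide) (by decide) (hno _ _)]
    simp only [Bool.false_eq_true, if_false]
    rw [if_neg]
    rintro ⟨h3, -, -⟩
    exact hlen3 h3
  case pos =>
    rcases List.eq_nil_or_concat (pvSplit base) with hnil | ⟨R1, t, hRt⟩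
    · exact absurd hnil (pvSplit_ne_nil base)
    rw [List.concat_eq_append] at hRt
    rcases List.eq_nil_or_concat R1 with h1 | ⟨Q, s, hQs⟩
    · rw [h1] at hRt; rw [hRt] at hlen3; simp at hlen3
    rw [List.concat_eq_append] at hQs
    subst hQs
    have hRQ : pvSplit base = Q ++ [s, t] := by rw [hRt]; simp
    have hQne : Q ≠ [] := by
      intro hq; rw [hq] at hRQ; rw [hRQ] at hlen3; simp at hlen3
    have hget : (pvSplit base).getLastD [] = t := by rw [hRt]; exact List.getLastD_concat
    have hdl : (pvSplit base).dropLast = Q ++ [s] := by rw [hRt]; exact List.dropLast_concat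
    have hget2 : (pvSplit base).dropLast.getLastD [] = s := by rw [hdl]; exact List.getLastD_concat
    have hdd : (pvSplit base).dropLast.dropLast = Q := by rw [hdl]; exact List.dropLast_concat
    have huniq : ∀ (s' t' : List Char), (∃ Q', Q' ≠ [] ∧ pvSplit base = Q' ++ [s', t']) ↔ (s = s' ∧ t = t') := by
      intro s' t'
      constructor
      · rintro ⟨Q', hQ', hsp'⟩
        rw [hRQ] at hsp'
        obtain ⟨-, h2⟩ := List.append_inj' hsp' (by simp)
        simp at h2
        exact ⟨h2.1, h2.2⟩
      · rintro ⟨h1', h2'⟩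
        exact ⟨Q, hQne, by rw [hRQ, h1', h2']⟩
    simp only [pvLoop2, l1, l2, l3]
    by_cases hj : s = "java".toList
    · subst hj
      have hget2' : (pvSplit base).dropLast.getLast?.getD [] = "java".toList := by
        simpa using hget2
      by_cases hp : t = "patch".toList
      · subst hp
        rw [(hT _ _ (by decide) (by decide)).mpr ((huniq _ _).mpr ⟨rfl, rfl⟩), if_pos rfl]
        rw [hdd, hget]
        rw [show -(((('.' :: "java".toList ++ '.' :: "patch".toList) : List Char).length : Int)) =
              -((("java".toList.length : Int) + "patch".toList.length) + 2) by decide]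
        rw [strip2_eq_join base Q _ _ hQne hRQ]
        simp [hlen3, hget2']
      · by_cases hn : t = "new".toList
        · subst hn
          rw [hF _ _ (by decide) (by decide) (fun hx => hp ((huniq _ _).mp hx).2)]
          rw [(hT _ _ (by decide) (by decide)).mpr ((huniq _ _).mpr ⟨rfl, rfl⟩)]
          simp only [Bool.false_eq_true, if_false]
          rw [if_pos trivial]
          rw [hdd, hget]
          rw [show -(((('.' :: "java".toList ++ '.' :: "new".toList) : List Char).length : Int)) =
                -((("java".toList.length : Int) + "new".toList.length) + 2) by decide]
          rw [strip2_eq_join base Q _ _ hQne hRQ]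
          simp [hlen3, hget2']
        · by_cases hd : t = "delete".toList
          · subst hd
            rw [hF _ _ (by decide) (by decide) (fun hx => hp ((huniq _ _).mp hx).2),
                hF _ _ (by decide) (by decide) (fun hx => hn ((huniq _ _).mp hx).2)]
            rw [(hT _ _ (by decide) (by decide)).mpr ((huniq _ _).mpr ⟨rfl, rfl⟩)]
            simp only [Bool.false_eq_true, if_false]
            rw [if_pos trivial]
            rw [hdd, hget]
            rw [show -(((('.' :: "java".toList ++ '.' :: "delete".toList) : List Char).length : Int)) =
                  -((("java".toList.length : Int) + "delete".toList.length) + 2) by decide]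
            rw [strip2_eq_join base Q _ _ hQne hRQ]
            simp [hlen3, hget2']
          · rw [hF _ _ (by decide) (by decide) (fun hx => hp ((huniq _ _).mp hx).2),
                hF _ _ (by decide) (by decide) (fun hx => hn ((huniq _ _).mp hx).2),
                hF _ _ (by decide) (by decide) (fun hx => hd ((huniq _ _).mp hx).2)]
            simp only [Bool.false_eq_true, if_false]
            rw [if_neg]
            rintro ⟨-, -, hk⟩
            rw [hget] at hk
            rcases hk with h | h | h
            exacts [hp h, hn h, hd h]
    · rw [hF _ _ (by decide) (by decide) (fun hx => hj ((huniq _ _).mp hx).1),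
          hF _ _ (by decide) (by decide) (fun hx => hj ((huniq _ _).mp hx).1),
          hF _ _ (by decide) (by decide) (fun hx => hj ((huniq _ _).mp hx).1)]
      simp only [Bool.false_eq_true, if_false]
      rw [if_neg]
      rintro ⟨-, hjv, -⟩
      rw [hget2] at hjv
      exact hj hjv

-- the two ports agree on every string
theorem core_eq (l : List Char) :
    pvLoop2 [(".java.patch".toList, "patch".toList),
             (".java.new".toList, "new".toList),
             (".java.delete".toList, "delete".toList)]
      (pvLoop1 ["client".toList, "server".toList] l).2
      (pvLoop1 ["client".toList, "server".toList] l).1 =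
      (let parts := pvSplit l
       let last1 := parts.getLastD []
       let ap :=
         if last1 = "client".toList ∨ last1 = "server".toList
         then ([String.ofList last1], parts.dropLast)
         else ((["client", "server"] : List String), parts)
       if 3 ≤ ap.2.length ∧ ap.2.dropLast.getLastD [] = "java".toList ∧
          (ap.2.getLastD [] = "patch".toList ∨ ap.2.getLastD [] = "new".toList ∨
           ap.2.getLastD [] = "delete".toList)
       then some (String.ofList (PySem.Chars.join ['.'] (ap.2.dropLast.dropLast) ++ ".java".toList),
                  String.ofList (ap.2.getLastD []), ap.1)
       else none) := by
  rcases List.eq_nil_or_concat (pvSplit l) with hnil | ⟨P, t1, hMP⟩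
  · exact absurd hnil (pvSplit_ne_nil l)
  rw [List.concat_eq_append] at hMP
  have hget1 : (pvSplit l).getLastD [] = t1 := by rw [hMP]; exact List.getLastD_concat
  have hdl1 : (pvSplit l).dropLast = P := by rw [hMP]; exact List.dropLast_concat
  have hdest : ∀ d : List Char, '.' ∉ d →
      (PySem.Chars.endswith l ('.' :: d) = true ↔ (P ≠ [] ∧ t1 = d)) := by
    intro d hd
    rw [PySem.Chars.endswith_iff, suffix_iff_pvSplit d hd l]
    constructor
    · rintro ⟨Q, hQ, hsp⟩
      rw [hMP] at hsp
      obtain ⟨h1, h2⟩ := List.append_inj' hsp (by simp)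
      simp at h2
      exact ⟨by rw [h1]; exact hQ, h2⟩
    · rintro ⟨hP, ht⟩
      exact ⟨P, hP, by rw [hMP, ht]⟩
  have hdestF : ∀ d : List Char, '.' ∉ d → ¬(P ≠ [] ∧ t1 = d) →
      PySem.Chars.endswith l ('.' :: d) = false := by
    intro d hd hn
    rw [Bool.eq_false_iff]
    exact fun he => hn ((hdest d hd).mp he)
  have hnd : ∀ p ∈ P, '.' ∉ p := fun p hp =>
    pvSplit_no_dot l p (by rw [hMP]; exact List.mem_append_left _ hp)
  by_cases hc : t1 = "client".toList
  · by_cases hP : P = []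
    · have hl : l = "client".toList := by
        rw [← join_pvSplit l, hMP, hP, hc]
        simp [PySem.Chars.join_singleton]
      rw [hl]
      decide
    · have e1 : PySem.Chars.endswith l ('.' :: "client".toList) = true :=
        (hdest _ (by decide)).mpr ⟨hP, hc⟩
      have hres : pvLoop1 ["client".toList, "server".toList] l =
          ("client".toList, PySem.Chars.slice l none (some (-(("client".toList.length : Int) + 1)))) := by
        simp only [pvLoop1]
        rw [e1]
        simp
      rw [hres]
      dsimp only
      rw [strip_eq_join l P _ hP (by rw [hMP, hc])]
      rw [stage2 (PySem.Chars.join ['.'] P) "client".toList]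
      rw [pvSplit_join P hP hnd]
      rw [hget1, hc, hdl1]
      rw [if_pos (Or.inl rfl)]
      dsimp only
      rw [if_neg (by decide : ¬("client".toList.isEmpty = true))]
  · by_cases hs : t1 = "server".toList
    · by_cases hP : P = []
      · have hl : l = "server".toList := by
          rw [← join_pvSplit l, hMP, hP, hs]
          simp [PySem.Chars.join_singleton]
        rw [hl]
        decide
      · have e1 : PySem.Chars.endswith l ('.' :: "client".toList) = false :=
          hdestF _ (by decide) (fun h => hc h.2)
        have e2 : PySem.Chars.endswith l ('.' :: "server".toList) = true :=
          (hdest _ (by decide)).mpr ⟨hP, hs⟩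
        have hres : pvLoop1 ["client".toList, "server".toList] l =
            ("server".toList, PySem.Chars.slice l none (some (-(("server".toList.length : Int) + 1)))) := by
          simp only [pvLoop1]
          rw [e1, e2]
          simp
        rw [hres]
        dsimp only
        rw [strip_eq_join l P _ hP (by rw [hMP, hs])]
        rw [stage2 (PySem.Chars.join ['.'] P) "server".toList]
        rw [pvSplit_join P hP hnd]
        rw [hget1, hs, hdl1]
        rw [if_pos (Or.inr rfl)]
        dsimp only
        rw [if_neg (by decide : ¬("server".toList.isEmpty = true))]
    · have e1 : PySem.Chars.endswith l ('.' :: "client".toList) = false :=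
        hdestF _ (by decide) (fun h => hc h.2)
      have e2 : PySem.Chars.endswith l ('.' :: "server".toList) = false :=
        hdestF _ (by decide) (fun h => hs h.2)
      have hres : pvLoop1 ["client".toList, "server".toList] l = ([], l) := by
        simp only [pvLoop1]
        rw [e1, e2]
        simp
      rw [hres]
      dsimp only
      rw [stage2 l [], hget1]
      rw [if_neg (show ¬(t1 = "client".toList ∨ t1 = "server".toList) from by
            rintro (h | h)
            exacts [hc h, hs h])]
      dsimp only
      rw [hget1]
      simp

-- ===== VERDICT (by name: the statement is the Claim_ definition above) =====
theorem parse_patch_filename_spec : Claim_equal_parse_patch_filename := by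
  intro rel_full _hdom
  show parse_patch_filename rel_full = parse_patch_filename_alt rel_full
  unfold parse_patch_filename parse_patch_filename_alt
  simp only [splitOn_eq_pvSplit]
  exact core_eq rel_full.toList
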